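-- pv_equiv track=rewrite | github.com/TridipKarmakar/Data-Science-course---IIT-Madras | 0.test_try.py | find_cheapest_fruit
-- ===== SOURCE A (Python) =====
-- def find_cheapest_fruit(fruit_prices2 : dict ) -> str :
--
--     fruit_prices2_tuples =  list(fruit_prices2.items())
--     min_fruits, min_price = fruit_prices2_tuples[0]
--
--     for fruit,price in fruit_prices2_tuples[1:] :
--         if price < min_price :
--             min_fruits = fruit
--             min_price = price
--         elif price == min_price :
--             min_fruits += ", " + fruit
--
--
--     if "," in min_fruits :
--
--         return(f"13. The cheapest price fruits are {min_fruits} and the price is Rs.{min_price}")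
--
--     else :
--         return(f"13. The cheapest price fruit is {min_fruits} and the price is Rs.{min_price}")
-- ===== SOURCE B (Python) =====
-- def find_cheapest_fruit(fruit_prices2: dict) -> str:
--     items = list(fruit_prices2.items())
--     min_price = min(price for _, price in items)
--     min_fruits = ", ".join(fruit for fruit, price in items if price == min_price)
--     label = "fruits are" if "," in min_fruits else "fruit is"
--     return f"13. The cheapest price {label} {min_fruits} and the price is Rs.{min_price}"
-- ===== Notes on version B (the rewrite author's own statement) =====
-- stated objective: simpler
-- what changed: A's single accumulating pass (running min with a comma-accumulated name string that is reset whenever a strictly smaller price appears) is replaced by two plain passes: min() over the prices, then a join of the fruits filtered to that minimum; the plural test stays the comma-substring test on the joined string.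
import Mathlib
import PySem

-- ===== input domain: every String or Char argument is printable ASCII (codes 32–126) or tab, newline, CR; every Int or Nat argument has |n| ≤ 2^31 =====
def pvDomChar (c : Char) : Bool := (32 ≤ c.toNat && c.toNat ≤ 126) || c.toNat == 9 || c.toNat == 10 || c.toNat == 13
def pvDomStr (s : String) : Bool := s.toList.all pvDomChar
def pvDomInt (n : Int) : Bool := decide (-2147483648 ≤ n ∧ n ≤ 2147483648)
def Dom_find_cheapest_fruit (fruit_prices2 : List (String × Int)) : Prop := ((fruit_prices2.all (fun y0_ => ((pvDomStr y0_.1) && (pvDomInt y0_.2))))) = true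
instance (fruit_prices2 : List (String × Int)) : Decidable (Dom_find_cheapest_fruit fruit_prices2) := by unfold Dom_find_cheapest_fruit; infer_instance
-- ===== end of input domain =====

-- B replaces A's single accumulating pass (running min + comma-accumulated string that
-- resets on each new minimum) by two passes: min() over the prices, then a join of the
-- fruits filtered to that minimum; objective: simpler.

-- ===== PORT A =====
-- the loop body: new minimum resets the name, equal price appends ", " + fruit
def fcfStep (acc : String × Int) (x : String × Int) : String × Int :=
  if x.2 < acc.2 then (x.1, x.2)
  else if x.2 == acc.2 then (acc.1 ++ ", " ++ x.1, acc.2)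
  else acc

def find_cheapest_fruit (fruit_prices2 : List (String × Int)) : String :=
  match fruit_prices2 with
  | [] => ""  -- fruit_prices2_tuples[0] raises IndexError; excluded by Pre_
  | h :: rest =>
    let r := rest.foldl fcfStep h
    if PySem.Str.isIn "," r.1 then
      "13. The cheapest price fruits are " ++ r.1 ++ " and the price is Rs." ++ PySem.Int.toStr r.2
    else
      "13. The cheapest price fruit is " ++ r.1 ++ " and the price is Rs." ++ PySem.Int.toStr r.2

-- ===== PORT B =====
def find_cheapest_fruit_alt (fruit_prices2 : List (String × Int)) : String :=
  match PySem.List.min? (fruit_prices2.map (fun x => x.2)) (fun y => y) with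
  | none => ""  -- min() on an empty sequence raises ValueError; excluded by Pre_
  | some min_price =>
    let min_fruits := PySem.Str.join ", " ((fruit_prices2.filter (fun x => x.2 == min_price)).map (fun x => x.1))
    let label := if PySem.Str.isIn "," min_fruits then "fruits are" else "fruit is"
    "13. The cheapest price " ++ label ++ " " ++ min_fruits ++ " and the price is Rs." ++ PySem.Int.toStr min_price

-- ===== PRECONDITION & SPEC =====
-- Pre_ excludes only the empty dict, on which A raises IndexError (and B ValueError).
def Pre_find_cheapest_fruit (fruit_prices2 : List (String × Int)) : Prop :=
  fruit_prices2 ≠ []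
instance (fruit_prices2 : List (String × Int)) : Decidable (Pre_find_cheapest_fruit fruit_prices2) := by unfold Pre_find_cheapest_fruit; infer_instance

def pvWitness_find_cheapest_fruit : (List (String × Int)) := [("apple", 30), ("kiwi", 20), ("plum", 20)]

def Spec_find_cheapest_fruit (fruit_prices2 : List (String × Int)) (out : String) : Prop := out = find_cheapest_fruit_alt fruit_prices2
instance (fruit_prices2 : List (String × Int)) (out : String) : Decidable (Spec_find_cheapest_fruit fruit_prices2 out) := by unfold Spec_find_cheapest_fruit; infer_instance

-- ===== CLAIM (what is proved, stated in full; the proofs are below) =====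
def Claim_equal_find_cheapest_fruit : Prop := ∀ (fruit_prices2 : List (String × Int)), Dom_find_cheapest_fruit fruit_prices2 → Pre_find_cheapest_fruit fruit_prices2 → Spec_find_cheapest_fruit fruit_prices2 (find_cheapest_fruit fruit_prices2)

-- ===== LEMMAS AND PROOFS =====

-- joining a string that already carries one separator is joining the two pieces
theorem join_merge (a b : String) (l : List String) :
    PySem.Str.join ", " ((a ++ ", " ++ b) :: l) = PySem.Str.join ", " (a :: b :: l) := by
  rw [← String.toList_inj]
  cases l with
  | nil =>
    simp [PySem.Str.toList_join, PySem.Chars.join_singleton, PySem.Chars.join_cons_cons]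
  | cons c t =>
    simp [PySem.Str.toList_join, PySem.Chars.join_cons_cons]

-- the running minimum never increases
theorem foldl_min_le (rest : List (String × Int)) (mp : Int) :
    rest.foldl (fun m x => min m x.2) mp ≤ mp := by
  induction rest generalizing mp with
  | nil => simp
  | cons x t ih =>
    simp only [List.foldl_cons]
    exact le_trans (ih (min mp x.2)) (min_le_left _ _)

-- closed form of A's accumulating loop: the minimum, and the join of the fruits at it
theorem fold_spec (rest : List (String × Int)) (mf : String) (mp : Int) :
    rest.foldl fcfStep (mf, mp) =
      (PySem.Str.join ", "
        ((if rest.foldl (fun m x => min m x.2) mp = mp then [mf] else []) ++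
          (rest.filter (fun x => x.2 == rest.foldl (fun m x => min m x.2) mp)).map (fun x => x.1)),
       rest.foldl (fun m x => min m x.2) mp) := by
  induction rest generalizing mf mp with
  | nil => simp [PySem.Str.join, PySem.Chars.join_singleton]
  | cons x t ih =>
    simp only [List.foldl_cons]
    rcases lt_trichotomy x.2 mp with hlt | heq | hgt
    · have hstep : fcfStep (mf, mp) x = (x.1, x.2) := by
        simp [fcfStep, hlt]
      have hmin : min mp x.2 = x.2 := min_eq_right (le_of_lt hlt)
      have hM : t.foldl (fun m x => min m x.2) x.2 ≤ x.2 := foldl_min_le t _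
      have hne : ¬ t.foldl (fun m x => min m x.2) x.2 = mp := by omega
      rw [hstep, ih]
      simp only [hmin, if_neg hne, List.filter_cons]
      by_cases hx : t.foldl (fun m x => min m x.2) x.2 = x.2
      · have hxb : (x.2 == t.foldl (fun m x => min m x.2) x.2) = true := by simp [hx]
        simp only [if_pos hx, hxb, if_true, List.map_cons, List.nil_append, List.singleton_append]
      · have hxb : (x.2 == t.foldl (fun m x => min m x.2) x.2) = false := by simp; omega
        simp only [if_neg hx, hxb, Bool.false_eq_true, if_false, List.nil_append]
    · have hstep : fcfStep (mf, mp) x = (mf ++ ", " ++ x.1, mp) := by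
        simp [fcfStep, heq]
      have hmin : min mp x.2 = mp := by rw [heq]; simp
      rw [hstep, ih]
      simp only [hmin, List.filter_cons]
      by_cases hMc : t.foldl (fun m x => min m x.2) mp = mp
      · have hxin : (x.2 == t.foldl (fun m x => min m x.2) mp) = true := by
          simp [hMc, heq]
        simp only [if_pos hMc, hxin, if_true, List.map_cons, List.cons_append]
        exact Prod.ext (join_merge mf x.1 _) rfl
      · have hxout : (x.2 == t.foldl (fun m x => min m x.2) mp) = false := by
          simp [heq]; intro h; exact hMc h.symm
        simp only [if_neg hMc, hxout, Bool.false_eq_true, if_false]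
    · have hstep : fcfStep (mf, mp) x = (mf, mp) := by
        have h1 : ¬ x.2 < mp := by omega
        have h2 : (x.2 == mp) = false := by simp; omega
        simp [fcfStep, h1, h2]
      have hmin : min mp x.2 = mp := min_eq_left (le_of_lt hgt)
      have hM : t.foldl (fun m x => min m x.2) mp ≤ mp := foldl_min_le t _
      have hxout : (x.2 == t.foldl (fun m x => min m x.2) mp) = false := by simp; omega
      rw [hstep, ih]
      simp only [hmin, List.filter_cons, hxout, Bool.false_eq_true, if_false]

-- ===== VERDICT (by name: the statement is the Claim_ definition above) =====
theorem find_cheapest_fruit_spec : Claim_equal_find_cheapest_fruit := by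
  intro l _ hpre
  unfold Spec_find_cheapest_fruit
  match l with
  | [] => exact absurd rfl hpre
  | h :: rest =>
    unfold find_cheapest_fruit find_cheapest_fruit_alt
    simp only [List.map_cons, PySem.List.min?_id_cons]
    have hmap : (rest.map (fun x => x.2)).foldl min h.2 = rest.foldl (fun m x => min m x.2) h.2 :=
      List.foldl_map
    rw [hmap, fold_spec rest h.1 h.2]
    have hfilter :
        ((h :: rest).filter (fun x => x.2 == rest.foldl (fun m x => min m x.2) h.2)).map
            (fun x => x.1) =
          (if rest.foldl (fun m x => min m x.2) h.2 = h.2 then [h.1] else []) ++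
            (rest.filter (fun x => x.2 == rest.foldl (fun m x => min m x.2) h.2)).map
              (fun x => x.1) := by
      by_cases hh : rest.foldl (fun m x => min m x.2) h.2 = h.2
      · have : (h.2 == rest.foldl (fun m x => min m x.2) h.2) = true := by simp [hh]
        simp only [List.filter_cons, this, if_true, List.map_cons, if_pos hh,
          List.singleton_append]
      · have : (h.2 == rest.foldl (fun m x => min m x.2) h.2) = false := by
          simp; intro hc; exact hh hc.symm
        simp only [List.filter_cons, this, Bool.false_eq_true, if_false, if_neg hh,
          List.nil_append]
    rw [hfilter]
    by_cases hc : PySem.Str.isIn ","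
        (PySem.Str.join ", "
          ((if rest.foldl (fun m x => min m x.2) h.2 = h.2 then [h.1] else []) ++
            (rest.filter (fun x => x.2 == rest.foldl (fun m x => min m x.2) h.2)).map
              (fun x => x.1))) = true
    · simp only [hc, if_true]
      rw [← String.toList_inj]; simp
    · simp only [Bool.not_eq_true] at hc
      simp only [hc, Bool.false_eq_true, if_false]
      rw [← String.toList_inj]; simp
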